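-- pv_equiv track=rewrite | github.com/JemPak/PyProjects | polidivisibles.py | es_polidivisible
-- ===== SOURCE A (Python) =====
-- def es_polidivisible(num):
--     x=len(str(num))
--     y=len(str(num))
--     espol=False
--     cont=0
--     while num>0:
--         if num%x==0:
--             x=x-1
--             num=num//10
--             cont+=1
--         else:
--             break
--     if cont==y:
--         espol=True
--     return espol
-- ===== SOURCE B (Python) =====
-- def es_polidivisible(num):
--     if num <= 0:
--         return False
--     d = len(str(num))
--     p = 10 ** (d - 1)
--     i = 1
--     while i <= d:
--         if (num // p) % i != 0:
--             return False
--         p //= 10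
--         i += 1
--     return True
-- ===== Notes on version B (the rewrite author's own statement) =====
-- stated objective: alternative
-- what changed: B guards non-positive inputs, then checks each decimal prefix shortest-to-longest by dividing by a decreasing power of ten, instead of A's right-to-left destructive digit peeling with a step counter compared to the digit count.
import Mathlib
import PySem

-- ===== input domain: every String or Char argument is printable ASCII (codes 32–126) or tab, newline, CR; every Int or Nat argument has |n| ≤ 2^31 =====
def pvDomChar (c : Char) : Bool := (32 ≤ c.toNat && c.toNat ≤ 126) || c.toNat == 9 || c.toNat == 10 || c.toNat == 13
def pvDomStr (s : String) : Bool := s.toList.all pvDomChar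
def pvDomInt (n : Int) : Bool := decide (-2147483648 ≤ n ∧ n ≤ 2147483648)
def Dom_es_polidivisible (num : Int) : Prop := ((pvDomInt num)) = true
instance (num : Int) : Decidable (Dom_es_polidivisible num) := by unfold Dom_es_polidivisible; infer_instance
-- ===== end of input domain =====

-- B replaces A's right-to-left destructive peeling (num //= 10, step counter compared with the
-- digit count) by a shortest-to-longest prefix check via a decreasing power of ten.

-- ===== PORT A =====
-- the 'while num>0' loop of A; state (num, x, cont); returns the final cont
def esLoop (num x cont : Int) : Int :=
  if _h : 0 < num then
    if PySem.Int.mod num x == 0 then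
      esLoop (PySem.Int.floordiv num 10) (x - 1) (cont + 1)
    else cont
  else cont
termination_by num.toNat
decreasing_by
  have : PySem.Int.floordiv num 10 = num / 10 :=
    PySem.Int.floordiv_eq_ediv_of_pos (by norm_num)
  rw [this]; omega

def es_polidivisible (num : Int) : Bool :=
  let x : Int := PySem.Str.len (PySem.Int.toStr num)
  let y : Int := PySem.Str.len (PySem.Int.toStr num)
  let espol : Bool := false
  let cont : Int := 0
  let cont : Int := esLoop num x cont
  let espol : Bool := if cont == y then true else espol
  espol

-- ===== PORT B =====
-- the 'while i <= d' loop of B; state (p, i); num and d are fixed through the loop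
def altLoop (num d p i : Int) : Bool :=
  if _h : i ≤ d then
    if PySem.Int.mod (PySem.Int.floordiv num p) i != 0 then false
    else altLoop num d (PySem.Int.floordiv p 10) (i + 1)
  else true
termination_by (d + 1 - i).toNat
decreasing_by omega

def es_polidivisible_alt (num : Int) : Bool :=
  if num ≤ 0 then false
  else
    let d : Int := PySem.Str.len (PySem.Int.toStr num)
    let p : Int := 10 ^ (d - 1).toNat
    altLoop num d p 1

-- ===== PRECONDITION & SPEC =====
def Spec_es_polidivisible (num : Int) (out : Bool) : Prop := out = es_polidivisible_alt num
instance (num : Int) (out : Bool) : Decidable (Spec_es_polidivisible num out) := by unfold Spec_es_polidivisible; infer_instance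

-- ===== CLAIM (what is proved, stated in full; the proofs are below) =====
def Claim_equal_es_polidivisible : Prop := ∀ (num : Int), Dom_es_polidivisible num → Spec_es_polidivisible num (es_polidivisible num)

-- ===== LEMMAS AND PROOFS =====

-- exact length of Nat.toDigitsCore on the empty accumulator
lemma tdc_len : ∀ f n, n < f → (Nat.toDigitsCore 10 f n []).length = Nat.log 10 n + 1 := by
  intro f
  induction f with
  | zero => intro n h; omega
  | succ f ih =>
    intro n h
    simp only [Nat.toDigitsCore]
    by_cases h10 : n / 10 = 0
    · have : n < 10 := by omega
      simp [h10, Nat.log_eq_zero_iff.2 (Or.inl this)]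
    · rw [if_neg h10, Nat.toDigitsCore_lens_eq]
      have hn10 : 10 ≤ n := by omega
      rw [ih (n / 10) (by omega), Nat.log_div_base]
      have : 0 < Nat.log 10 n := Nat.log_pos (by norm_num) hn10
      omega

-- length of str(n) for n > 0 is the number of decimal digits
lemma strlen_pos_eq (n : Nat) (hn : 0 < n) :
    PySem.Str.len (PySem.Int.toStr (n : Int)) = ((Nat.log 10 n + 1 : Nat) : Int) := by
  rw [PySem.Str.len_eq, PySem.Int.toList_toStr]
  unfold PySem.Int.toChars
  rw [if_neg (by omega)]
  simp [Nat.toDigits, tdc_len (n + 1) n (by omega)]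

-- str(num) is never empty
lemma strlen_ge_one (num : Int) : 1 ≤ PySem.Str.len (PySem.Int.toStr num) := by
  rw [PySem.Str.len_eq, PySem.Int.toList_toStr]
  unfold PySem.Int.toChars
  split
  · simp
  · simp [Nat.toDigits]
    have := tdc_len (num.toNat + 1) num.toNat (by omega)
    omega

-- characterization of A's loop, started at stage j (num = n / 10^j, cont = j)
lemma esLoop_char (n dd : Nat) (h1 : 10 ^ dd ≤ n) (h2 : n < 10 ^ (dd + 1)) :
  ∀ t j, j ≤ dd + 1 → dd + 1 - j = t →
    (esLoop ((n / 10 ^ j : Nat) : Int) (((dd + 1 : Nat) : Int) - ((j : Nat) : Int)) ((j : Nat) : Int)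
        = ((dd + 1 : Nat) : Int)
      ↔ ∀ k, j ≤ k → k ≤ dd → (n / 10 ^ k) % (dd + 1 - k) = 0) := by
  intro t
  induction t with
  | zero =>
    intro j hj ht
    have hj' : j = dd + 1 := by omega
    subst hj'
    have h0 : n / 10 ^ (dd + 1) = 0 := Nat.div_eq_of_lt h2
    rw [h0, esLoop, dif_neg (by simp)]
    constructor
    · intro _ k hk1 hk2; omega
    · intro _; rfl
  | succ t ih =>
    intro j hj ht
    have hjd : j ≤ dd := by omega
    have hpos : 0 < n / 10 ^ j := Nat.div_pos (le_trans (Nat.pow_le_pow_right (by norm_num) hjd) h1) (by positivity)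
    rw [esLoop, dif_pos (by exact_mod_cast hpos)]
    have hx : (((dd + 1 : Nat) : Int) - ((j : Nat) : Int)) = ((dd + 1 - j : Nat) : Int) := by
      push_cast; omega
    rw [hx, PySem.Int.mod_natCast]
    by_cases hmod : (n / 10 ^ j) % (dd + 1 - j) = 0
    · rw [hmod]
      simp only [Nat.cast_zero, beq_self_eq_true, if_true]
      have hfd : PySem.Int.floordiv ((n / 10 ^ j : Nat) : Int) 10 = ((n / 10 ^ (j + 1) : Nat) : Int) := by
        rw [PySem.Int.floordiv_eq_ediv_of_pos (by norm_num)]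
        have hsq : n / 10 ^ (j + 1) = (n / 10 ^ j) / 10 := by
          rw [pow_succ, ← Nat.div_div_eq_div_mul]
        rw [hsq]; exact_mod_cast rfl
      rw [hfd]
      have harg1 : ((dd + 1 - j : Nat) : Int) - 1 = (((dd + 1 : Nat) : Int) - ((j + 1 : Nat) : Int)) := by
        push_cast; omega
      have harg2 : ((j : Nat) : Int) + 1 = ((j + 1 : Nat) : Int) := by push_cast; ring
      rw [harg1, harg2, ih (j + 1) (by omega) (by omega)]
      constructor
      · intro hall k hk1 hk2
        rcases Nat.eq_or_lt_of_le hk1 with rfl | hlt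
        · exact hmod
        · exact hall k (by omega) hk2
      · intro hall k hk1 hk2
        exact hall k (by omega) hk2
    · have hne : (((n / 10 ^ j) % (dd + 1 - j) : Nat) : Int) ≠ 0 := by exact_mod_cast hmod
      rw [if_neg (by simpa using hne)]
      constructor
      · intro habs
        exfalso
        have : j = dd + 1 := by exact_mod_cast habs
        omega
      · intro hall
        exact absurd (hall j le_rfl hjd) hmod

-- characterization of B's loop, started at index i with p = 10^(d-i)
lemma altLoop_char (n dd : Nat) :
  ∀ t i p, 1 ≤ i → i ≤ dd + 2 → dd + 2 - i = t → (i ≤ dd + 1 → p = ((10 ^ (dd + 1 - i) : Nat) : Int)) →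
    (altLoop (n : Int) ((dd + 1 : Nat) : Int) p ((i : Nat) : Int) = true
      ↔ ∀ m, i ≤ m → m ≤ dd + 1 → (n / 10 ^ (dd + 1 - m)) % m = 0) := by
  intro t
  induction t with
  | zero =>
    intro i p hi1 hi2 ht hp
    have hi : i = dd + 2 := by omega
    subst hi
    rw [altLoop, dif_neg (by exact_mod_cast (by omega : ¬ (dd + 2 : Int) ≤ (dd + 1 : Int)))]
    constructor
    · intro _ m hm1 hm2; omega
    · intro _; rfl
  | succ t ih =>
    intro i p hi1 hi2 ht hp
    have hid : i ≤ dd + 1 := by omega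
    have hp' := hp hid
    subst hp'
    rw [altLoop, dif_pos (by exact_mod_cast hid)]
    have hq : PySem.Int.floordiv ((n : Nat) : Int) ((10 ^ (dd + 1 - i) : Nat) : Int)
        = ((n / 10 ^ (dd + 1 - i) : Nat) : Int) := by
      rw [PySem.Int.floordiv_eq_ediv_of_pos (by positivity)]
      exact_mod_cast rfl
    rw [hq, PySem.Int.mod_natCast]
    by_cases hmod : (n / 10 ^ (dd + 1 - i)) % i = 0
    · rw [hmod]
      simp only [Nat.cast_zero, bne_self_eq_false, Bool.false_eq_true, if_false]
      have hfp : PySem.Int.floordiv ((10 ^ (dd + 1 - i) : Nat) : Int) 10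
          = ((10 ^ (dd + 1 - (i + 1)) : Nat) : Int) ∨ i = dd + 1 := by
        by_cases hc : i = dd + 1
        · exact Or.inr hc
        · left
          rw [PySem.Int.floordiv_eq_ediv_of_pos (by norm_num)]
          have : 10 ^ (dd + 1 - (i + 1)) = 10 ^ (dd + 1 - i) / 10 := by
            have h1 : dd + 1 - i = (dd + 1 - (i + 1)) + 1 := by omega
            rw [h1, pow_succ]
            omega
          rw [this]; exact_mod_cast rfl
      have hcast : ((i : Nat) : Int) + 1 = (((i + 1 : Nat)) : Int) := by push_cast; ring
      rw [hcast]
      have key : altLoop ((n : Nat) : Int) ((dd + 1 : Nat) : Int)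
            (PySem.Int.floordiv ((10 ^ (dd + 1 - i) : Nat) : Int) 10) (((i + 1 : Nat)) : Int) = true
          ↔ ∀ m, i + 1 ≤ m → m ≤ dd + 1 → (n / 10 ^ (dd + 1 - m)) % m = 0 := by
        rcases hfp with hfp | hfp
        · rw [hfp]
          exact ih (i + 1) _ (by omega) (by omega) (by omega) (fun _ => rfl)
        · exact ih (i + 1) _ (by omega) (by omega) (by omega) (fun h => absurd h (by omega))
      rw [key]
      constructor
      · intro hall m hm1 hm2
        rcases Nat.eq_or_lt_of_le hm1 with rfl | hlt
        · exact hmod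
        · exact hall m (by omega) hm2
      · intro hall m hm1 hm2
        exact hall m (by omega) hm2
    · have hne : (((n / 10 ^ (dd + 1 - i)) % i : Nat) : Int) ≠ 0 := by exact_mod_cast hmod
      rw [if_pos (by simpa using hne)]
      constructor
      · intro habs; exact absurd habs (by simp)
      · intro hall; exact absurd (hall i le_rfl hid) hmod

-- ===== VERDICT (by name: the statement is the Claim_ definition above) =====
theorem es_polidivisible_spec : Claim_equal_es_polidivisible := by
  intro num _
  simp only [Spec_es_polidivisible, es_polidivisible, es_polidivisible_alt]
  by_cases hpos : 0 < num
  · rw [if_neg (show ¬ num ≤ 0 by omega)]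
    have hn0 : 0 < num.toNat := by omega
    have hnum : num = ((num.toNat : Nat) : Int) := by omega
    rw [hnum]
    set n := num.toNat with hn
    set dd := Nat.log 10 n with hdd
    have hlen : PySem.Str.len (PySem.Int.toStr ((n : Nat) : Int)) = ((dd + 1 : Nat) : Int) :=
      strlen_pos_eq n hn0
    have h1 : 10 ^ dd ≤ n := Nat.pow_log_le_self 10 (by omega)
    have h2 : n < 10 ^ (dd + 1) := Nat.lt_pow_succ_log_self (by norm_num) n
    rw [hlen]
    have hA := esLoop_char n dd h1 h2 (dd + 1) 0 (by omega) (by omega)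
    simp only [pow_zero, Nat.div_one, Nat.cast_zero, sub_zero] at hA
    have hptoNat : ((((dd + 1 : Nat) : Int) - 1).toNat) = dd := by omega
    have hpval : ((10 : Int) ^ ((((dd + 1 : Nat) : Int) - 1).toNat)) = ((10 ^ (dd + 1 - 1) : Nat) : Int) := by
      rw [hptoNat]; push_cast; norm_num
    have hB := altLoop_char n dd (dd + 1) 1 ((10 : Int) ^ ((((dd + 1 : Nat) : Int) - 1).toNat))
      (by omega) (by omega) (by omega) (fun _ => hpval)
    have hone : ((1 : Nat) : Int) = (1 : Int) := by norm_num
    rw [hone] at hB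
    by_cases hAeq : esLoop ((n : Nat) : Int) ((dd + 1 : Nat) : Int) 0 = ((dd + 1 : Nat) : Int)
    · rw [if_pos (by simpa using hAeq)]
      symm
      refine hB.2 (fun m hm1 hm2 => ?_)
      have := hA.1 hAeq (dd + 1 - m) (by omega) (by omega)
      have e : dd + 1 - (dd + 1 - m) = m := by omega
      rwa [e] at this
    · rw [if_neg (by simpa using hAeq)]
      symm
      have hne : altLoop ((n : Nat) : Int) ((dd + 1 : Nat) : Int)
          ((10 : Int) ^ ((((dd + 1 : Nat) : Int) - 1).toNat)) 1 ≠ true := by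
        intro hR
        refine hAeq (hA.2 (fun k hk1 hk2 => ?_))
        have := hB.1 hR (dd + 1 - k) (by omega) (by omega)
        have e : dd + 1 - (dd + 1 - k) = k := by omega
        rwa [e] at this
      simpa using hne
  · rw [if_pos (show num ≤ 0 by omega)]
    rw [esLoop, dif_neg hpos]
    have hy := strlen_ge_one num
    have hne : ¬ (((0 : Int) == PySem.Str.len (PySem.Int.toStr num)) = true) := by
      simp only [beq_iff_eq]
      omega
    rw [if_neg hne]
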